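-- pv_equiv track=rewrite | github.com/tsirleo/SoftwareTesting_examUtils | CA_factorsGenerator.py | build_coverage_array
-- ===== SOURCE A (Python) =====
-- import itertools
--
-- def generate_pairs(factors):
--     """
--     Generate all possible pairs of results for each combination of two factors.
--     """
--     pairs = []
--     num_factors = len(factors)
--     for i in range(num_factors):
--         for j in range(i + 1, num_factors):
--             for value_i in factors[i]:
--                 for value_j in factors[j]:
--                     pairs.append(((i, value_i), (j, value_j)))
--     return pairs
--
-- def find_best_test(factors, uncovered_pairs):
--     """
--     Find a test that covers the maximum number of uncovered pairs.
--     """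
--     best_test = None
--     best_coverage = 0
--     covered_by_test = set()
--
--     for potential_test in itertools.product(*factors):
--         current_coverage = set()
--         for (i, value_i), (j, value_j) in uncovered_pairs:
--             if potential_test[i] == value_i and potential_test[j] == value_j:
--                 current_coverage.add(((i, value_i), (j, value_j)))
--
--         if len(current_coverage) > best_coverage:
--             best_test = potential_test
--             best_coverage = len(current_coverage)
--             covered_by_test = current_coverage
--
--     return best_test, covered_by_test
--
-- def build_coverage_array(factors):
--     """
--     Construction of a minimal set of tests to cover all pairs.
--     """
--     uncovered_pairs = set(generate_pairs(factors))
--     test_set = []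
--
--     while uncovered_pairs:
--         best_test, covered_by_test = find_best_test(factors, uncovered_pairs)
--         test_set.append(best_test)
--         uncovered_pairs -= covered_by_test
--
--     return test_set
-- ===== SOURCE B (Python) =====
-- def build_coverage_array(factors):
--     n = len(factors)
--     uncovered = {((i, vi), (j, vj))
--                  for i in range(n) for j in range(i + 1, n)
--                  for vi in factors[i] for vj in factors[j]}
--     tests = []
--     while uncovered:
--         best, best_cnt = None, 0
--
--         def dfs(idx, prefix, cnt):
--             nonlocal best, best_cnt
--             if idx == n:
--                 if cnt > best_cnt:
--                     best, best_cnt = list(prefix), cnt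
--                 return
--             for v in factors[idx]:
--                 delta = sum(1 for i in range(idx)
--                             if ((i, prefix[i]), (idx, v)) in uncovered)
--                 prefix.append(v)
--                 dfs(idx + 1, prefix, cnt + delta)
--                 prefix.pop()
--
--         dfs(0, [], 0)
--         tests.append(tuple(best))
--         uncovered -= {((i, best[i]), (j, best[j]))
--                       for i in range(n) for j in range(i + 1, n)}
--     return tests
-- ===== Notes on version B (the rewrite author's own statement) =====
-- stated objective: alternative
-- what changed: A enumerates itertools.product(*factors) and, for each candidate, re-scans the whole uncovered-pair set; B replaces that enumeration by a recursive DFS over the factors that builds each test incrementally, accumulating the coverage count as a running sum of per-extension deltas (each new value only checks its pairs with the already-placed prefix), and after choosing the best test subtracts its induced pairs wholesale instead of carrying a covered-set through the search.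
import Mathlib
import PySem

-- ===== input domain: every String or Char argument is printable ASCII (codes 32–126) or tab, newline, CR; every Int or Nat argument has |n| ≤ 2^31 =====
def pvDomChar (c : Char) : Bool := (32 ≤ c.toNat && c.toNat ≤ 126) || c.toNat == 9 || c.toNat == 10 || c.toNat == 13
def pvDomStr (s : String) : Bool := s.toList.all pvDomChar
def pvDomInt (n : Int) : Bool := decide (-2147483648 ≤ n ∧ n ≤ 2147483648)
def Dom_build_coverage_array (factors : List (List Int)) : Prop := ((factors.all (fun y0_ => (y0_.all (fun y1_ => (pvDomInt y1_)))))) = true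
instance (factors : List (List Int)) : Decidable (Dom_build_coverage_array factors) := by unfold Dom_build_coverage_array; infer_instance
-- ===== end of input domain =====

-- B replaces A's product-enumeration-with-full-rescan by a recursive DFS over the factors that
-- accumulates the coverage count incrementally (each extension checks only its pairs with the
-- already-placed prefix) and subtracts the chosen test's induced pairs wholesale (objective: alternative).

abbrev PVPair := (Int × Int) × (Int × Int)

-- ===== PORT A =====
-- generate_pairs: nested for-loops appending ((i, value_i), (j, value_j))
def pvGenPairs (factors : List (List Int)) : List PVPair :=
  (PySem.List.pyRange 0 (factors.length : Int) 1).foldl (fun acc i =>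
    (PySem.List.pyRange (i + 1) (factors.length : Int) 1).foldl (fun acc j =>
      (PySem.List.pyGetD factors i []).foldl (fun acc vi =>
        (PySem.List.pyGetD factors j []).foldl (fun acc vj =>
          acc ++ [((i, vi), (j, vj))]) acc) acc) acc) []

-- itertools.product(*factors), in Python's order (leftmost factor varies slowest)
def pvProduct (fs : List (List Int)) : List (List Int) :=
  fs.foldr (fun f acc => f.flatMap (fun v => acc.map (fun t => v :: t))) [[]]

-- current_coverage: scan the whole uncovered set, adding every pair the candidate matches
def pvCovA (t : List Int) (uncovered : List PVPair) : PySem.Set PVPair :=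
  uncovered.foldl (fun c p =>
    if PySem.List.pyGet? t p.1.1 == some p.1.2 && PySem.List.pyGet? t p.2.1 == some p.2.2
    then PySem.Set.add c p else c) PySem.Set.empty

-- find_best_test
def pvFindBest (factors : List (List Int)) (uncovered : List PVPair) :
    Option (List Int) × List PVPair :=
  (pvProduct factors).foldl (fun st t =>
    let cov := pvCovA t uncovered
    if cov.length > st.2.length then (some t, cov) else st)
    ((none : Option (List Int)), (PySem.Set.empty : PySem.Set PVPair))

-- the while-loop; fuel = |uncovered|: every iteration of the Python loop that leads to a
-- return removes at least one pair.  (When best_test is None the Python loop never returns,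
-- so on every input where the Python returns the `.getD []` default is never observable.)
def pvLoopA (factors : List (List Int)) : Nat → List PVPair → List (List Int) → List (List Int)
  | 0, _, acc => acc
  | fuel + 1, unc, acc =>
    if unc.isEmpty then acc
    else
      let bt := pvFindBest factors unc
      pvLoopA factors fuel (PySem.Set.diff unc bt.2) (acc ++ [bt.1.getD []])

def pvInitA (factors : List (List Int)) : PySem.Set PVPair :=
  PySem.Set.ofList (pvGenPairs factors)

def build_coverage_array (factors : List (List Int)) : List (List Int) :=
  pvLoopA factors (pvInitA factors).length (pvInitA factors) []

-- ===== PORT B =====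
-- delta = sum(1 for i in range(idx) if ((i, prefix[i]), (idx, v)) in uncovered)
def pvDelta (unc : List PVPair) (pre : List Int) (idx : Int) (v : Int) : Int :=
  (PySem.List.pyRange 0 idx 1).foldl (fun c i =>
    if PySem.Set.contains unc ((i, PySem.List.pyGetD pre i 0), (idx, v)) then c + 1 else c) 0

-- the recursive dfs of B, threading (best, best_cnt) as the accumulator; the list of the
-- still-unplaced factors is the recursion structure (idx follows Python's index)
def pvDfs (unc : List PVPair) : List (List Int) → Int → List Int → Int →
    Option (List Int) × Int → Option (List Int) × Int
  | [], _, pre, cnt, best => if cnt > best.2 then (some pre, cnt) else best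
  | f :: rest, idx, pre, cnt, best =>
      f.foldl (fun b v =>
        pvDfs unc rest (idx + 1) (pre ++ [v]) (cnt + pvDelta unc pre idx v) b) best

-- list of index pairs i < j < n (order of B's set-comprehension loops)
def pvIP (n : Int) : List (Int × Int) :=
  (PySem.List.pyRange 0 n 1).flatMap (fun i =>
    (PySem.List.pyRange (i + 1) n 1).map (fun j => (i, j)))

-- the pair the test t induces at index pair (i, j): ((i, t[i]), (j, t[j]))
def pvPairAt (t : List Int) (ij : Int × Int) : PVPair :=
  ((ij.1, PySem.List.pyGetD t ij.1 0), (ij.2, PySem.List.pyGetD t ij.2 0))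

-- {((i, best[i]), (j, best[j])) for i in range(n) for j in range(i+1, n)}
def pvInduced (n : Int) (t : List Int) : List PVPair := (pvIP n).map (pvPairAt t)

-- uncovered: B's set comprehension over i, j, vi, vj
def pvInitB (factors : List (List Int)) : PySem.Set PVPair :=
  (PySem.List.pyRange 0 (factors.length : Int) 1).foldl (fun s i =>
    (PySem.List.pyRange (i + 1) (factors.length : Int) 1).foldl (fun s j =>
      (PySem.List.pyGetD factors i []).foldl (fun s vi =>
        (PySem.List.pyGetD factors j []).foldl (fun s vj =>
          PySem.Set.add s ((i, vi), (j, vj))) s) s) s) PySem.Set.empty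

-- the while-loop of B; same fuel discipline as A's port.  When dfs found no test Python B
-- raises TypeError (never on an input where it returns), so that branch only totalises.
def pvLoopB (factors : List (List Int)) (n : Int) :
    Nat → List PVPair → List (List Int) → List (List Int)
  | 0, _, acc => acc
  | fuel + 1, unc, acc =>
    if unc.isEmpty then acc
    else
      match (pvDfs unc factors 0 [] 0 ((none : Option (List Int)), (0 : Int))).1 with
      | none => pvLoopB factors n fuel unc (acc ++ [[]])
      | some t => pvLoopB factors n fuel (PySem.Set.diff unc (pvInduced n t)) (acc ++ [t])

def build_coverage_array_alt (factors : List (List Int)) : List (List Int) :=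
  pvLoopB factors (factors.length : Int) (pvInitB factors).length (pvInitB factors) []

-- ===== PRECONDITION & SPEC =====
def Spec_build_coverage_array (factors : List (List Int)) (out : List (List Int)) : Prop :=
  out = build_coverage_array_alt factors
instance (factors : List (List Int)) (out : List (List Int)) :
    Decidable (Spec_build_coverage_array factors out) := by
  unfold Spec_build_coverage_array; infer_instance

-- ===== CLAIM (what is proved, stated in full; the proofs are below) =====
def Claim_equal_build_coverage_array : Prop :=
  ∀ (factors : List (List Int)), Dom_build_coverage_array factors →
    Spec_build_coverage_array factors (build_coverage_array factors)

-- ===== LEMMAS AND PROOFS =====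

-- canonical flattened pair list (proof-only)
def pvCanon (factors : List (List Int)) : List PVPair :=
  (PySem.List.pyRange 0 (factors.length : Int) 1).flatMap (fun i =>
    (PySem.List.pyRange (i + 1) (factors.length : Int) 1).flatMap (fun j =>
      (PySem.List.pyGetD factors i []).flatMap (fun vi =>
        (PySem.List.pyGetD factors j []).map (fun vj => ((i, vi), (j, vj))))))

-- index-shape invariant of every generated pair
def pvOkay (n : Int) (p : PVPair) : Prop := 0 ≤ p.1.1 ∧ p.1.1 < p.2.1 ∧ p.2.1 < n

-- proof-only: the index pairs a dfs path from (pre, idx) to a leaf contributes, in dfs order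
def pvKeys : Int → List Int → List (Int × Int)
  | _, [] => []
  | idx, _ :: suf => (PySem.List.pyRange 0 idx 1).map (fun i => (i, idx)) ++ pvKeys (idx + 1) suf

-- proof-only: the leaf count a dfs path accumulates from (pre, idx, cnt := 0)
def pvD (unc : List PVPair) : List Int → Int → List Int → Int
  | _, _, [] => 0
  | pre, idx, v :: suf => pvDelta unc pre idx v + pvD unc (pre ++ [v]) (idx + 1) suf

lemma pvContains_iff {l : List PVPair} {x : PVPair} :
    PySem.Set.contains l x = true ↔ x ∈ l := by
  simp [PySem.Set.contains]

lemma pvMem_pvIP (n : Int) (ij : Int × Int) :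
    ij ∈ pvIP n ↔ 0 ≤ ij.1 ∧ ij.1 < ij.2 ∧ ij.2 < n := by
  obtain ⟨i, j⟩ := ij
  simp only [pvIP, List.mem_flatMap, List.mem_map, PySem.List.mem_pyRange_one, Prod.mk.injEq]
  constructor
  · rintro ⟨a, ⟨h1, h2⟩, b, ⟨h3, h4⟩, rfl, rfl⟩
    exact ⟨h1, by omega, h4⟩
  · rintro ⟨h1, h2, h3⟩
    exact ⟨i, ⟨h1, by omega⟩, j, ⟨by omega, h3⟩, rfl, rfl⟩

lemma pvCanon_shape (factors : List (List Int)) (p : PVPair) (hp : p ∈ pvCanon factors) :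
    pvOkay (factors.length : Int) p := by
  simp only [pvCanon, List.mem_flatMap, List.mem_map, PySem.List.mem_pyRange_one] at hp
  obtain ⟨i, ⟨h1, _⟩, j, ⟨h2, h3⟩, vi, _, vj, _, rfl⟩ := hp
  exact ⟨h1, show i < j by omega, h3⟩

lemma pvGenPairs_eq_canon (factors : List (List Int)) : pvGenPairs factors = pvCanon factors := by
  have h1 : ∀ (i j : Int) (acc : List PVPair),
      List.foldl (fun acc vi =>
        List.foldl (fun acc vj => acc ++ [((i, vi), (j, vj))]) acc (PySem.List.pyGetD factors j []))
        acc (PySem.List.pyGetD factors i [])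
      = acc ++ (PySem.List.pyGetD factors i []).flatMap (fun vi =>
          (PySem.List.pyGetD factors j []).map (fun vj => ((i, vi), (j, vj)))) := by
    intro i j acc
    rw [← PySem.List.foldl_append_eq_flatMap]
    exact PySem.List.foldl_congr_mem _ _ _ _ (fun acc vi _ =>
      PySem.List.foldl_append_singleton_eq_map _ _ _)
  have h2 : ∀ (i : Int) (acc : List PVPair),
      List.foldl (fun acc j =>
        List.foldl (fun acc vi =>
          List.foldl (fun acc vj => acc ++ [((i, vi), (j, vj))]) acc (PySem.List.pyGetD factors j []))
          acc (PySem.List.pyGetD factors i []))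
        acc (PySem.List.pyRange (i + 1) (factors.length : Int) 1)
      = acc ++ (PySem.List.pyRange (i + 1) (factors.length : Int) 1).flatMap (fun j =>
          (PySem.List.pyGetD factors i []).flatMap (fun vi =>
            (PySem.List.pyGetD factors j []).map (fun vj => ((i, vi), (j, vj))))) := by
    intro i acc
    rw [← PySem.List.foldl_append_eq_flatMap]
    exact PySem.List.foldl_congr_mem _ _ _ _ (fun acc j _ => h1 i j acc)
  have h3 : pvGenPairs factors = [] ++ pvCanon factors := by
    unfold pvGenPairs pvCanon
    rw [← PySem.List.foldl_append_eq_flatMap]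
    exact PySem.List.foldl_congr_mem _ _ _ _ (fun acc i _ => h2 i acc)
  simpa using h3

lemma pvFoldlAdd_flatMap {α β : Type} [BEq β] (l : List α) (g : α → List β) (s : PySem.Set β) :
    List.foldl PySem.Set.add s (l.flatMap g)
      = List.foldl (fun s x => List.foldl PySem.Set.add s (g x)) s l := by
  exact List.foldl_flatMap

lemma pvInitB_eq_canon (factors : List (List Int)) :
    pvInitB factors = PySem.Set.ofList (pvCanon factors) := by
  have he : (PySem.Set.empty : PySem.Set PVPair) = [] := rfl
  rw [pvInitB, pvCanon, PySem.Set.ofList_eq_foldl, pvFoldlAdd_flatMap, he]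
  apply PySem.List.foldl_congr_mem
  intro s i _
  rw [pvFoldlAdd_flatMap]
  apply PySem.List.foldl_congr_mem
  intro s j _
  rw [pvFoldlAdd_flatMap]
  apply PySem.List.foldl_congr_mem
  intro s vi _
  rw [List.foldl_map]

lemma pvProduct_len (fs : List (List Int)) (t : List Int) (ht : t ∈ pvProduct fs) :
    t.length = fs.length := by
  induction fs generalizing t with
  | nil =>
    simp only [pvProduct, List.foldr_nil, List.mem_singleton] at ht
    simp [ht]
  | cons f fs ih =>
    simp only [pvProduct, List.foldr_cons, List.mem_flatMap, List.mem_map] at ht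
    obtain ⟨v, _, t', ht', rfl⟩ := ht
    simp [ih t' ht']

lemma pvCovA_eq (t : List Int) (unc : List PVPair) :
    pvCovA t unc = PySem.Set.ofList (unc.filter (fun p =>
      PySem.List.pyGet? t p.1.1 == some p.1.2 && PySem.List.pyGet? t p.2.1 == some p.2.2)) := by
  rw [pvCovA, PySem.List.foldl_if_eq_foldl_filter, PySem.Set.ofList_eq_foldl]
  rfl

lemma pvPairAt_inj (t : List Int) : Function.Injective (pvPairAt t) := by
  intro a b h
  have h1 := congrArg (fun q : PVPair => q.1.1) h
  have h2 := congrArg (fun q : PVPair => q.2.1) h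
  exact Prod.ext h1 h2

-- a pair of unc matches t iff it is one of t's induced pairs (given shape and |t| = n)
lemma pvMatch_iff (t : List Int) (q : PVPair) (hq : pvOkay (t.length : Int) q) :
    ((PySem.List.pyGet? t q.1.1 == some q.1.2 &&
      PySem.List.pyGet? t q.2.1 == some q.2.2) = true)
      ↔ ∃ ij, (0 ≤ ij.1 ∧ ij.1 < ij.2 ∧ ij.2 < (t.length : Int)) ∧ pvPairAt t ij = q := by
  obtain ⟨h0, h1, h2⟩ := hq
  have h01 : (0 : Int) ≤ q.2.1 := by omega
  constructor
  · intro hc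
    rw [Bool.and_eq_true, beq_iff_eq, beq_iff_eq] at hc
    have e1 : q.1.2 = t[q.1.1.toNat]'(by omega) := by
      have := hc.1; rw [PySem.List.pyGet?_eq_some_getElem t h0 (by omega)] at this
      exact (Option.some_inj.1 this).symm
    have e2 : q.2.2 = t[q.2.1.toNat]'(by omega) := by
      have := hc.2; rw [PySem.List.pyGet?_eq_some_getElem t h01 (by omega)] at this
      exact (Option.some_inj.1 this).symm
    refine ⟨(q.1.1, q.2.1), ⟨h0, h1, h2⟩, ?_⟩
    rw [pvPairAt]
    rw [PySem.List.pyGetD_eq_getElem t 0 h0 (by omega), PySem.List.pyGetD_eq_getElem t 0 h01 (by omega)]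
    rw [← e1, ← e2]
  · rintro ⟨ij, ⟨g0, g1, g2⟩, rfl⟩
    rw [pvPairAt, Bool.and_eq_true, beq_iff_eq, beq_iff_eq]
    have g01 : (0 : Int) ≤ ij.2 := by omega
    rw [PySem.List.pyGet?_eq_some_getElem t g0 (by omega), PySem.List.pyGet?_eq_some_getElem t g01 (by omega)]
    rw [PySem.List.pyGetD_eq_getElem t 0 g0 (by omega), PySem.List.pyGetD_eq_getElem t 0 g01 (by omega)]
    exact ⟨rfl, rfl⟩

lemma pvDelta_eq (unc : List PVPair) (pre : List Int) (idx v : Int) :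
    pvDelta unc pre idx v
      = (((PySem.List.pyRange 0 idx 1).filter (fun i =>
          PySem.Set.contains unc ((i, PySem.List.pyGetD pre i 0), (idx, v)))).length : Int) := by
  rw [pvDelta, PySem.List.foldl_if_add_one, List.countP_eq_length_filter]
  simp

lemma pvMem_pvKeys (suf : List Int) : ∀ (idx : Int), 0 ≤ idx →
    ∀ (ij : Int × Int), ij ∈ pvKeys idx suf ↔
      0 ≤ ij.1 ∧ ij.1 < ij.2 ∧ idx ≤ ij.2 ∧ ij.2 < idx + suf.length := by
  induction suf with
  | nil => intro idx _ ij; simp [pvKeys]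
  | cons v suf ih =>
    intro idx hidx ij
    simp only [pvKeys, List.mem_append, List.mem_map, PySem.List.mem_pyRange_one,
      ih (idx + 1) (by omega), List.length_cons]
    constructor
    · rintro (⟨i, ⟨hi0, hi1⟩, rfl⟩ | ⟨a, b, c, d⟩)
      · exact ⟨hi0, by omega, by omega, by omega⟩
      · exact ⟨a, b, by omega, by omega⟩
    · rintro ⟨a, b, c, d⟩
      by_cases hj : ij.2 = idx
      · exact Or.inl ⟨ij.1, ⟨a, by omega⟩, by rw [← hj]⟩
      · exact Or.inr ⟨a, b, by omega, by omega⟩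

lemma pvNodup_pvKeys (suf : List Int) : ∀ (idx : Int), 0 ≤ idx → (pvKeys idx suf).Nodup := by
  induction suf with
  | nil => intro idx _; simp [pvKeys]
  | cons v suf ih =>
    intro idx hidx
    rw [pvKeys]
    refine List.Nodup.append ?_ (ih (idx + 1) (by omega)) ?_
    · exact (PySem.List.nodup_pyRange_one 0 idx).map (fun a b h =>
        (Prod.mk.injEq _ _ _ _ ▸ h).1)
    · intro ij h1 h2
      simp only [List.mem_map, PySem.List.mem_pyRange_one] at h1
      obtain ⟨i, _, rfl⟩ := h1
      have := ((pvMem_pvKeys suf (idx + 1) (by omega)) (i, idx)).1 h2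
      omega

-- the running dfs count from (pre, idx) equals the membership count over the path's keys
lemma pvD_eq (unc : List PVPair) (t : List Int) :
    ∀ (suf pre : List Int) (idx : Int), pre ++ suf = t → idx = (pre.length : Int) →
      pvD unc pre idx suf
        = ((((pvKeys idx suf).map (pvPairAt t)).filter
            (fun q => PySem.Set.contains unc q)).length : Int) := by
  intro suf
  induction suf with
  | nil => intro pre idx _ _; simp [pvD, pvKeys]
  | cons v suf ih =>
    intro pre idx hpre hidx
    have hidx0 : 0 ≤ idx := by omega
    rw [pvD, pvKeys, List.map_append, List.filter_append, List.length_append]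
    push_cast
    congr 1
    · -- the chunk: pvDelta counts exactly the pairs with the placed prefix
      rw [pvDelta_eq, List.map_map]
      have hmap : ((PySem.List.pyRange 0 idx 1).map (pvPairAt t ∘ fun i => (i, idx)))
          = (PySem.List.pyRange 0 idx 1).map
              (fun i => ((i, PySem.List.pyGetD pre i 0), (idx, v))) := by
        apply List.map_congr_left
        intro i hi
        rw [PySem.List.mem_pyRange_one] at hi
        obtain ⟨hi0, hi1⟩ := hi
        have hlt : i < (t.length : Int) := by
          subst hpre; simp only [List.length_append, List.length_cons]; push_cast; omega
        have hidxlt : idx < (t.length : Int) := by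
          subst hpre; simp only [List.length_append, List.length_cons]; push_cast; omega
        simp only [Function.comp_apply, pvPairAt]
        rw [PySem.List.pyGetD_eq_getElem t 0 hi0 hlt,
            PySem.List.pyGetD_eq_getElem t 0 hidx0 hidxlt,
            PySem.List.pyGetD_eq_getElem pre 0 hi0 (by omega)]
        subst hpre
        have ha : i.toNat < pre.length := by omega
        have hb : pre.length ≤ idx.toNat := by omega
        have hc : idx.toNat - pre.length = 0 := by omega
        rw [List.getElem_append_left ha, List.getElem_append_right hb]
        simp [hc]
      rw [hmap, List.filter_map, List.length_map]
      rfl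
    · -- the tail: IH at pre ++ [v]
      rw [ih (pre ++ [v]) (idx + 1) (by simpa using hpre)
            (by simp; omega)]

-- dfs from (pre, idx, cnt) is the fold of the leaf comparison over all completions
lemma pvDfs_eq_foldl (unc : List PVPair) (fs : List (List Int)) :
    ∀ (idx : Int) (pre : List Int) (cnt : Int) (best : Option (List Int) × Int),
      pvDfs unc fs idx pre cnt best
        = (pvProduct fs).foldl (fun b suf =>
            if cnt + pvD unc pre idx suf > b.2
            then (some (pre ++ suf), cnt + pvD unc pre idx suf) else b) best := by
  induction fs with
  | nil =>
    intro idx pre cnt best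
    simp [pvDfs, pvProduct, pvD]
  | cons f rest ih =>
    intro idx pre cnt best
    have hprod : pvProduct (f :: rest)
        = f.flatMap (fun v => (pvProduct rest).map (fun t => v :: t)) := by
      simp [pvProduct]
    rw [pvDfs, hprod, List.foldl_flatMap]
    apply PySem.List.foldl_congr_mem
    intro b v _
    rw [List.foldl_map, ih (idx + 1) (pre ++ [v]) (cnt + pvDelta unc pre idx v) b]
    apply PySem.List.foldl_congr_mem
    intro b' suf _
    simp only [pvD, List.append_assoc, List.singleton_append, add_assoc]

-- |covered_by_test t| of A equals the dfs leaf count of B (nodup + shape + |t| = n)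
lemma pvCount_eq (unc : List PVPair) (t : List Int)
    (hsh : ∀ p ∈ unc, pvOkay ((t.length : Nat) : Int) p) :
    ((pvCovA t unc).length : Int) = pvD unc [] 0 t := by
  rw [pvD_eq unc t t [] 0 rfl (by simp)]
  have hmem : ∀ q : PVPair,
      q ∈ pvCovA t unc ↔
        q ∈ ((pvKeys 0 t).map (pvPairAt t)).filter (fun q => PySem.Set.contains unc q) := by
    intro q
    rw [pvCovA_eq]
    simp only [PySem.Set.mem_ofList, List.mem_filter, List.mem_map]
    constructor
    · rintro ⟨hq, hc⟩
      obtain ⟨ij, hb, hpa⟩ := (pvMatch_iff t q (hsh q hq)).1 hc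
      refine ⟨⟨ij, ?_, hpa⟩, pvContains_iff.2 hq⟩
      rw [pvMem_pvKeys t 0 le_rfl]
      exact ⟨hb.1, hb.2.1, by omega, by simpa using hb.2.2⟩
    · rintro ⟨⟨ij, hk, hpa⟩, hc⟩
      have hb := (pvMem_pvKeys t 0 le_rfl ij).1 hk
      refine ⟨pvContains_iff.1 hc, ?_⟩
      have := (pvMatch_iff t q ?_).2 ⟨ij, ⟨hb.1, hb.2.1, by simpa using hb.2.2.2⟩, hpa⟩
      · exact this
      · subst hpa
        exact ⟨by simpa using hb.1, by simpa using hb.2.1, by simpa using hb.2.2.2⟩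
  have nd1 : (pvCovA t unc).Nodup := by rw [pvCovA_eq]; exact PySem.Set.nodup_ofList _
  have nd2 : (((pvKeys 0 t).map (pvPairAt t)).filter
      (fun q => PySem.Set.contains unc q)).Nodup :=
    ((pvNodup_pvKeys t 0 le_rfl).map (pvPairAt_inj t)).filter _
  have hperm := (List.perm_ext_iff_of_nodup nd1 nd2).2 hmem
  rw [hperm.length_eq]

-- the selection of find_best_test vs the dfs of B, with A's carried covered-set characterised
lemma pvSel (factors : List (List Int)) (unc : List PVPair)
    (hsh : ∀ p ∈ unc, pvOkay ((factors.length : Nat) : Int) p) :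
    (pvFindBest factors unc).1 = (pvDfs unc factors 0 [] 0 (none, 0)).1 ∧
    ((pvFindBest factors unc).1 = none → (pvFindBest factors unc).2 = []) ∧
    (∀ t, (pvFindBest factors unc).1 = some t →
      t.length = factors.length ∧ (pvFindBest factors unc).2 = pvCovA t unc) := by
  rw [pvFindBest, pvDfs_eq_foldl]
  have key : ∀ (ts : List (List Int)) (stA : Option (List Int) × List PVPair)
      (stB : Option (List Int) × Int),
      (∀ t ∈ ts, t.length = factors.length) →
      stA.1 = stB.1 → ((stA.2.length : Int) = stB.2) →
      (stA.1 = none → stA.2 = []) →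
      (∀ t, stA.1 = some t → t.length = factors.length ∧ stA.2 = pvCovA t unc) →
      (let rA := List.foldl (fun st t =>
            let cov := pvCovA t unc
            if cov.length > st.2.length then (some t, cov) else st) stA ts
       let rB := List.foldl (fun b suf =>
            if 0 + pvD unc [] 0 suf > b.2
            then (some ([] ++ suf), 0 + pvD unc [] 0 suf) else b) stB ts
       rA.1 = rB.1 ∧ (rA.1 = none → rA.2 = []) ∧
       (∀ t, rA.1 = some t → t.length = factors.length ∧ rA.2 = pvCovA t unc)) := by
    intro ts
    induction ts with
    | nil =>
      intro stA stB _ e1 _ e3 e4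
      exact ⟨e1, e3, e4⟩
    | cons t ts ihts =>
      intro stA stB hlen e1 e2 e3 e4
      have htl : t.length = factors.length := hlen t List.mem_cons_self
      have hcnt : ((pvCovA t unc).length : Int) = 0 + pvD unc [] 0 t := by
        rw [pvCount_eq unc t (by rw [htl] at *; exact fun p hp => hsh p hp)]
        omega
      simp only [List.foldl_cons]
      by_cases hgt : (pvCovA t unc).length > stA.2.length
      · rw [if_pos hgt, if_pos (by omega : 0 + pvD unc [] 0 t > stB.2)]
        exact ihts _ _ (fun u hu => hlen u (List.mem_cons_of_mem _ hu)) (by simp)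
          (by simpa using hcnt) (by simp) (by
            intro u hu
            simp only [Option.some.injEq] at hu
            subst hu; exact ⟨htl, rfl⟩)
      · rw [if_neg hgt, if_neg (by omega : ¬ 0 + pvD unc [] 0 t > stB.2)]
        exact ihts _ _ (fun u hu => hlen u (List.mem_cons_of_mem _ hu)) e1 e2 e3 e4
  exact key (pvProduct factors) (none, PySem.Set.empty) (none, 0)
    (fun t ht => pvProduct_len factors t ht) rfl (by simp [PySem.Set.empty])
    (fun _ => rfl) (fun t h => by simp at h)

-- removing A's covered set = removing all of t's induced pairs (on a shaped unc, |t| = n)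
lemma pvDiff_eq (unc : List PVPair) (t : List Int)
    (hsh : ∀ p ∈ unc, pvOkay ((t.length : Nat) : Int) p) (n : Int)
    (hn : n = (t.length : Nat)) :
    PySem.Set.diff unc (pvCovA t unc) = PySem.Set.diff unc (pvInduced n t) := by
  unfold PySem.Set.diff
  apply List.filter_congr
  intro x hx
  have hiff : x ∈ pvCovA t unc ↔ x ∈ pvInduced n t := by
    rw [pvCovA_eq]
    simp only [PySem.Set.mem_ofList, List.mem_filter, pvInduced, List.mem_map]
    constructor
    · rintro ⟨_, hc⟩
      obtain ⟨ij, hb, hpa⟩ := (pvMatch_iff t x (hsh x hx)).1 hc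
      exact ⟨ij, (pvMem_pvIP n ij).2 ⟨hb.1, hb.2.1, by omega⟩, hpa⟩
    · rintro ⟨ij, hip, hpa⟩
      have hb := (pvMem_pvIP n ij).1 hip
      exact ⟨hx, (pvMatch_iff t x (hsh x hx)).2 ⟨ij, ⟨hb.1, hb.2.1, by omega⟩, hpa⟩⟩
  have : PySem.Set.contains (pvCovA t unc) x = PySem.Set.contains (pvInduced n t) x := by
    rw [Bool.eq_iff_iff, pvContains_iff, pvContains_iff]; exact hiff
  rw [this]

lemma pvLoop_eq (factors : List (List Int)) :
    ∀ (fuel : Nat) (unc : List PVPair) (acc : List (List Int)),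
      unc.Nodup → (∀ p ∈ unc, pvOkay ((factors.length : Nat) : Int) p) →
      pvLoopA factors fuel unc acc
        = pvLoopB factors (factors.length : Int) fuel unc acc := by
  intro fuel
  induction fuel with
  | zero => intro unc acc _ _; rfl
  | succ fuel ih =>
    intro unc acc hnd hsh
    rw [pvLoopA, pvLoopB]
    by_cases he : unc.isEmpty
    · rw [if_pos he, if_pos he]
    · rw [if_neg he, if_neg he]
      obtain ⟨h1, h2, h3⟩ := pvSel factors unc hsh
      cases hb : (pvDfs unc factors 0 [] 0 ((none : Option (List Int)), (0 : Int))).1 with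
      | none =>
        have hA : (pvFindBest factors unc).1 = none := by rw [h1, hb]
        have hAe : (pvFindBest factors unc).2 = [] := h2 hA
        show pvLoopA factors fuel (PySem.Set.diff unc (pvFindBest factors unc).2)
              (acc ++ [(pvFindBest factors unc).1.getD []])
            = pvLoopB factors (factors.length : Int) fuel unc (acc ++ [[]])
        rw [hA, hAe]
        have hd : PySem.Set.diff unc ([] : List PVPair) = unc := by
          simp [PySem.Set.diff, PySem.Set.contains]
        rw [hd]
        exact ih unc (acc ++ [[]]) hnd hsh
      | some t =>
        have hA : (pvFindBest factors unc).1 = some t := by rw [h1, hb]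
        obtain ⟨htl, hcov⟩ := h3 t hA
        show pvLoopA factors fuel (PySem.Set.diff unc (pvFindBest factors unc).2)
              (acc ++ [(pvFindBest factors unc).1.getD []])
            = pvLoopB factors (factors.length : Int) fuel
                (PySem.Set.diff unc (pvInduced (factors.length : Int) t)) (acc ++ [t])
        rw [hA, hcov, pvDiff_eq unc t (by rw [htl] at *; exact fun p hp => hsh p hp)
              (factors.length : Int) (by rw [htl])]
        exact ih _ _ ((List.Nodup.filter _) hnd) (fun p hp => hsh p (List.mem_filter.1 hp).1)

-- ===== VERDICT (by name: the statement is the Claim_ definition above) =====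
theorem build_coverage_array_spec : Claim_equal_build_coverage_array := by
  intro factors _
  show build_coverage_array factors = build_coverage_array_alt factors
  have hI : pvInitA factors = pvInitB factors := by
    rw [pvInitA, pvGenPairs_eq_canon, pvInitB_eq_canon]
  unfold build_coverage_array build_coverage_array_alt
  rw [hI]
  exact pvLoop_eq factors _ _ [] (by rw [pvInitB_eq_canon]; exact PySem.Set.nodup_ofList _)
    (fun p hp => pvCanon_shape factors p (by
      rw [pvInitB_eq_canon] at hp
      exact (PySem.Set.mem_ofList _ _).1 hp))
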